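-- pv_equiv track=rewrite | github.com/mjpatter88/ProjEuler | Problem046/solver.py | gen_odd_composites
-- ===== SOURCE A (Python) =====
-- def gen_odd_composites(limit):
--     candidates = [True] * limit
--     candidates[0] = False
--     candidates[1] = False
--
--     for i, is_prime in enumerate(candidates):
--         if is_prime:
--             for n in range(i, limit, i):
--                 candidates[n] = False
--         elif i > 1 and i % 2 != 0:
--             yield i
-- ===== SOURCE B (Python) =====
-- def _has_odd_divisor(n):
--     d = 3
--     while d * d <= n:
--         if n % d == 0:
--             return True
--         d += 2
--     return False
--
--
-- def gen_odd_composites(limit):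
--     for n in range(3, limit, 2):
--         if _has_odd_divisor(n):
--             yield n
-- ===== Notes on version B (the rewrite author's own statement) =====
-- stated objective: alternative
-- what changed: Replaces the mutable boolean sieve (which interleaves marking multiples of each prime with emission during one enumerate pass) with per-candidate trial division: iterate the odd candidates in order and emit those having a proper odd divisor no larger than their square root.
import Mathlib
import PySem

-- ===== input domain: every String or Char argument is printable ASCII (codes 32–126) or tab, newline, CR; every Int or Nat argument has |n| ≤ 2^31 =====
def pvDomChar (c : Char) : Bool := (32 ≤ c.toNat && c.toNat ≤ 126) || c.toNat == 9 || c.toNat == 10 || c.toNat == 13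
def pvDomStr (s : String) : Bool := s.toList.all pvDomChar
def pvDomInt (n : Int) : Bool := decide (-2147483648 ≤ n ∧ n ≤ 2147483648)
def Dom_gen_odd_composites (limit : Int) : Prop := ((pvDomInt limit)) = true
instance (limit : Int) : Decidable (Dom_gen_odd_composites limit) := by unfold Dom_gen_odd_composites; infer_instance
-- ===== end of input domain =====

-- B replaces A's interleaved boolean sieve with per-candidate odd trial division (alternative algorithm, same results).

-- ===== PORT A =====
-- Python's `for i, is_prime in enumerate(candidates)` reads the LIVE (mutated) list,
-- so the loop is ported as an index loop reading the current table at i.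
def pvSieveStep (limit : Int) (st : List Bool × List Int) (i : Nat) : List Bool × List Int :=
  if st.1.getD i false then
    ((PySem.List.pyRange (i : Int) limit (i : Int)).foldl (fun c n => c.set n.toNat false) st.1, st.2)
  else if 1 < (i : Int) ∧ (i : Int) % 2 ≠ 0 then (st.1, st.2 ++ [(i : Int)])
  else st

def gen_odd_composites (limit : Int) : List Int :=
  let candidates := ((List.replicate limit.toNat true).set 0 false).set 1 false
  ((List.range limit.toNat).foldl (pvSieveStep limit) (candidates, [])).2

-- ===== PORT B =====
-- fuel-bounded transcription of the `while d * d <= n` loop of _has_odd_divisor (fuel n.toNat suffices)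
def pvTrialLoop (n : Int) : Nat → Int → Bool
  | 0, _ => false
  | fuel + 1, d =>
    if d * d ≤ n then
      (if PySem.Int.mod n d == 0 then true else pvTrialLoop n fuel (d + 2))
    else false

def pvHasOddDivisor (n : Int) : Bool := pvTrialLoop n n.toNat 3

def gen_odd_composites_alt (limit : Int) : List Int :=
  (PySem.List.pyRange 3 limit 2).foldl (fun out n => if pvHasOddDivisor n then out ++ [n] else out) []

-- ===== PRECONDITION & SPEC =====
-- A raises IndexError (on the candidates[0]/candidates[1] assignments) whenever the table is too short to hold those two cells; exactly those inputs are excluded.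
def Pre_gen_odd_composites (limit : Int) : Prop := 2 ≤ limit
instance (limit : Int) : Decidable (Pre_gen_odd_composites limit) := by unfold Pre_gen_odd_composites; infer_instance
def pvWitness_gen_odd_composites : Int := (20)

def Spec_gen_odd_composites (limit : Int) (out : List Int) : Prop := out = gen_odd_composites_alt limit
instance (limit : Int) (out : List Int) : Decidable (Spec_gen_odd_composites limit out) := by unfold Spec_gen_odd_composites; infer_instance

-- ===== CLAIM (what is proved, stated in full; the proofs are below) =====
def Claim_equal_gen_odd_composites : Prop := ∀ (limit : Int), Dom_gen_odd_composites limit → Pre_gen_odd_composites limit → Spec_gen_odd_composites limit (gen_odd_composites limit)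

-- ===== LEMMAS AND PROOFS =====

-- the canonical value both ports compute: odd composite numbers below the limit, increasing
def pvPred (j : Nat) : Bool := decide (1 < j ∧ j % 2 = 1 ∧ ¬ Nat.Prime j)

def pvCanon (L : Nat) : List Int := ((List.range L).filter pvPred).map (fun j => Int.ofNat j)

-- "no smaller prime divides" characterizes primality
lemma pv_prime_char (i : Nat) : (2 ≤ i ∧ ∀ p, p < i → p.Prime → ¬ p ∣ i) ↔ i.Prime := by
  constructor
  · rintro ⟨h2, hns⟩
    by_contra hnp
    have h1 : i ≠ 1 := by omega
    have hpf := Nat.minFac_prime h1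
    have hdvd := Nat.minFac_dvd i
    have hne : i.minFac ≠ i := fun he => hnp (he ▸ hpf)
    have hlt : i.minFac < i := lt_of_le_of_ne (Nat.le_of_dvd (by omega) hdvd) hne
    exact hns _ hlt hpf hdvd
  · intro hp
    refine ⟨hp.two_le, fun p hlt hpp hdvd => ?_⟩
    rcases hp.eq_one_or_self_of_dvd p hdvd with h | h
    · exact absurd h hpp.one_lt.ne'
    · omega

lemma pv_mark_getD (ns : List Int) (h0 : ∀ n ∈ ns, 0 ≤ n) (c : List Bool) (j : Nat) :
    (ns.foldl (fun c n => c.set n.toNat false) c).getD j false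
      = (c.getD j false && !(decide ((j : Int) ∈ ns))) := by
  induction ns generalizing c with
  | nil => simp
  | cons n ns ih =>
    simp only [List.foldl_cons]
    rw [ih (fun m hm => h0 m (List.mem_cons_of_mem n hm))]
    have hset : (c.set n.toNat false).getD j false = (c.getD j false && !(decide (j = n.toNat))) := by
      by_cases h1 : n.toNat = j
      · subst h1
        by_cases h2 : n.toNat < c.length
        · simp [List.getD_eq_getElem?_getD, h2]
        · rw [List.set_eq_of_length_le (by omega), List.getD_eq_default _ _ (by omega)]
          simp
      · have hd : ¬ (j = n.toNat) := fun h => h1 h.symm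
        simp [List.getD_eq_getElem?_getD, h1, hd]
    rw [hset]
    have hn0 := h0 n (List.mem_cons_self)
    have hiff : ((j : Int) = n) ↔ (j = n.toNat) := by omega
    have hnot : (!decide ((j : Int) ∈ n :: ns)) = (!decide (j = n.toNat) && !decide ((j : Int) ∈ ns)) := by
      simp only [List.mem_cons]
      by_cases h1 : j = n.toNat
      · have hl : ((j : Int) = n ∨ (j : Int) ∈ ns) := Or.inl (hiff.mpr h1)
        have d1 : decide ((j : Int) = n ∨ (j : Int) ∈ ns) = true := decide_eq_true hl
        have d2 : decide (j = n.toNat) = true := decide_eq_true h1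
        rw [d1, d2]
        rfl
      · have h1' : ¬ ((j : Int) = n) := fun h => h1 (hiff.mp h)
        by_cases h2 : (j : Int) ∈ ns <;> simp [h1, h1', h2]
    rw [hnot, ← Bool.and_assoc]

lemma pv_mark_length (ns : List Int) (c : List Bool) :
    (ns.foldl (fun c n => c.set n.toNat false) c).length = c.length := by
  induction ns generalizing c with
  | nil => rfl
  | cons n ns ih => simp only [List.foldl_cons]; rw [ih]; exact List.length_set ..

lemma pv_sieve_inv (limit : Int) (h2 : 2 ≤ limit) (i : Nat) (hi : i ≤ limit.toNat) :
    (((List.range i).foldl (pvSieveStep limit)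
        (((List.replicate limit.toNat true).set 0 false).set 1 false, [])).1.length = limit.toNat)
    ∧ (∀ j : Nat, ((List.range i).foldl (pvSieveStep limit)
        (((List.replicate limit.toNat true).set 0 false).set 1 false, [])).1.getD j false
          = decide (2 ≤ j ∧ j < limit.toNat ∧ ∀ p, p < i → p.Prime → ¬ p ∣ j))
    ∧ ((List.range i).foldl (pvSieveStep limit)
        (((List.replicate limit.toNat true).set 0 false).set 1 false, [])).2
          = ((List.range i).filter pvPred).map (fun j => Int.ofNat j) := by
  induction i with
  | zero =>
    refine ⟨by simp, ?_, by simp⟩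
    intro j
    simp only [List.range_zero, List.foldl_nil]
    have hinit : (((List.replicate limit.toNat true).set 0 false).set 1 false).getD j false
        = decide (2 ≤ j ∧ j < limit.toNat) := by
      simp only [List.getD_eq_getElem?_getD, List.getElem?_set, List.length_set,
        List.length_replicate, List.getElem?_replicate]
      split_ifs <;> simp <;> omega
    rw [hinit, decide_eq_decide]
    constructor
    · rintro ⟨a, b⟩
      exact ⟨a, b, fun p hp => absurd hp (Nat.not_lt_zero p)⟩
    · rintro ⟨a, b, _⟩
      exact ⟨a, b⟩
  | succ i ih =>
    obtain ⟨hlen, hget, hout⟩ := ih (by omega)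
    rw [List.range_succ, List.foldl_append, List.foldl_cons, List.foldl_nil]
    set st := (List.range i).foldl (pvSieveStep limit)
      (((List.replicate limit.toNat true).set 0 false).set 1 false, []) with hst
    have hiL : i < limit.toNat := by omega
    have hci : st.1.getD i false = decide i.Prime := by
      rw [hget i, decide_eq_decide]
      constructor
      · rintro ⟨a, _, c'⟩
        exact (pv_prime_char i).mp ⟨a, c'⟩
      · intro hp
        exact ⟨hp.two_le, hiL, ((pv_prime_char i).mpr hp).2⟩
    unfold pvSieveStep
    by_cases hp : i.Prime
    · rw [hci, if_pos (by simp [hp])]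
      have hpos : (0:Int) < (i:Int) := by exact_mod_cast hp.pos
      refine ⟨?_, ?_, ?_⟩
      · rw [pv_mark_length]
        exact hlen
      · intro j
        rw [pv_mark_getD _ (fun n hn => by
              rw [PySem.List.mem_pyRange_iff_of_pos hpos] at hn
              omega) _ j, hget j]
        have hmem : ((j:Int) ∈ PySem.List.pyRange (i:Int) limit (i:Int))
            ↔ ((i:Int) ≤ (j:Int) ∧ (j:Int) < limit ∧ (i:Int) ∣ (j:Int) - (i:Int)) :=
          PySem.List.mem_pyRange_iff_of_pos hpos _
        rw [show (!decide ((j:Int) ∈ PySem.List.pyRange (i:Int) limit (i:Int)))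
              = decide (¬ ((i:Int) ≤ (j:Int) ∧ (j:Int) < limit ∧ (i:Int) ∣ (j:Int) - (i:Int))) from by
            rw [decide_not, decide_eq_decide.mpr hmem]]
        rw [← Bool.decide_and, decide_eq_decide]
        constructor
        · rintro ⟨⟨h2j, hjL', hns⟩, hnm⟩
          refine ⟨h2j, hjL', fun p hpi hpp hpd => ?_⟩
          rcases Nat.lt_or_ge p i with h | h
          · exact hns p h hpp hpd
          · have hpi' : p = i := by omega
            subst hpi'
            apply hnm
            have hij : ((p:Int)) ∣ ((j:Int)) := Int.natCast_dvd_natCast.mpr hpd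
            refine ⟨?_, by omega, (dvd_sub_right hij).mpr (dvd_refl _)⟩
            have := Nat.le_of_dvd (by omega) hpd
            exact_mod_cast this
        · rintro ⟨h2j, hjL', hns⟩
          refine ⟨⟨h2j, hjL', fun p hpi hpp hpd => hns p (by omega) hpp hpd⟩, ?_⟩
          rintro ⟨hij, hjlim, hdvd⟩
          have hij' : ((i:Int)) ∣ ((j:Int)) := by
            have h2 := dvd_add hdvd (dvd_refl ((i:Int)))
            rwa [sub_add_cancel] at h2
          exact hns i (by omega) hp (Int.natCast_dvd_natCast.mp hij')
      · rw [hout, List.filter_append]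
        have hpf : pvPred i = false := by
          unfold pvPred
          simp [hp]
        simp [hpf]
    · have hcif : st.1.getD i false = false := by
        rw [hci]
        simp [hp]
      rw [if_neg (by rw [hcif]; exact Bool.false_ne_true)]
      have hget' : ∀ j, st.1.getD j false
            = decide (2 ≤ j ∧ j < limit.toNat ∧ ∀ p, p < i + 1 → p.Prime → ¬ p ∣ j) := by
        intro j
        rw [hget j, decide_eq_decide]
        constructor
        · rintro ⟨a, b, c'⟩
          refine ⟨a, b, fun p hpi hpp hpd => ?_⟩
          rcases Nat.lt_or_ge p i with h | h
          · exact c' p h hpp hpd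
          · have hpe : p = i := by omega
            subst hpe
            exact hp hpp
        · rintro ⟨a, b, c'⟩
          exact ⟨a, b, fun p hpi hpp hpd => c' p (by omega) hpp hpd⟩
      by_cases hoc : 1 < (i:Int) ∧ (i:Int) % 2 ≠ 0
      · rw [if_pos hoc]
        refine ⟨hlen, hget', ?_⟩
        rw [hout, List.filter_append]
        have hpt : pvPred i = true := by
          unfold pvPred
          simp only [decide_eq_true_iff]
          exact ⟨by exact_mod_cast hoc.1, by omega, hp⟩
        simp [hpt]
      · rw [if_neg hoc]
        refine ⟨hlen, hget', ?_⟩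
        rw [hout, List.filter_append]
        have hpf : pvPred i = false := by
          unfold pvPred
          simp only [decide_eq_false_iff_not]
          rintro ⟨a, b, _⟩
          exact hoc ⟨by exact_mod_cast a, by omega⟩
        simp [hpf]

lemma pv_A_eq_canon (limit : Int) (h2 : 2 ≤ limit) :
    gen_odd_composites limit = pvCanon limit.toNat := by
  have h := (pv_sieve_inv limit h2 limit.toNat le_rfl).2.2
  unfold gen_odd_composites pvCanon
  exact h

lemma pv_trial_spec (n : Int) (hn3 : 3 ≤ n) (hodd : n % 2 = 1) :
    ∀ (fuel : Nat) (d : Int), 3 ≤ d → d % 2 = 1 → n < fuel + d →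
      (pvTrialLoop n fuel d = true ↔ ∃ k : Int, d ≤ k ∧ k * k ≤ n ∧ k ∣ n) := by
  intro fuel
  induction fuel with
  | zero =>
    intro d h3 hdodd hlt
    simp only [pvTrialLoop, Bool.false_eq_true, false_iff]
    rintro ⟨k, hk1, hk2, hk3⟩
    have hkn : k ≤ n := Int.le_of_dvd (by omega) hk3
    omega
  | succ fuel ih =>
    intro d h3 hdodd hlt
    simp only [pvTrialLoop]
    by_cases hdd : d * d ≤ n
    · rw [if_pos hdd]
      have hmod : PySem.Int.mod n d = n % d := by
        simp [PySem.Int.mod, Int.fmod_eq_emod, (by omega : (0:Int) ≤ d)]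
      by_cases hdvd : d ∣ n
      · have hz : (PySem.Int.mod n d == 0) = true := by
          rw [hmod, Int.emod_eq_zero_of_dvd hdvd]; rfl
        rw [if_pos hz]
        simp only [true_iff]
        exact ⟨d, le_refl d, hdd, hdvd⟩
      · have hz : ¬ ((PySem.Int.mod n d == 0) = true) := by
          rw [hmod]
          simp only [beq_iff_eq]
          exact fun h => hdvd (Int.dvd_of_emod_eq_zero h)
        rw [if_neg hz, ih (d + 2) (by omega) (by omega) (by omega)]
        constructor
        · rintro ⟨k, hk1, hk2, hk3⟩
          exact ⟨k, by omega, hk2, hk3⟩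
        · rintro ⟨k, hk1, hk2, hk3⟩
          have hkd : k ≠ d := fun he => hdvd (he ▸ hk3)
          have hkd1 : k ≠ d + 1 := by
            intro he
            subst he
            have h2k : (2:Int) ∣ d + 1 := by omega
            have h2n : (2:Int) ∣ n := h2k.trans hk3
            omega
          exact ⟨k, by omega, hk2, hk3⟩
    · rw [if_neg hdd]
      simp only [Bool.false_eq_true, false_iff]
      rintro ⟨k, hk1, hk2, hk3⟩
      have : d * d ≤ k * k := mul_le_mul hk1 hk1 (by omega) (by omega)
      omega

lemma pv_hasOddDivisor_correct (x : Int) (h3 : 3 ≤ x) (hodd : x % 2 = 1) :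
    pvHasOddDivisor x = decide (¬ (x.toNat).Prime) := by
  unfold pvHasOddDivisor
  rw [Bool.eq_iff_iff, pv_trial_spec x h3 hodd x.toNat 3 (by norm_num) (by norm_num) (by omega),
    decide_eq_true_iff]
  constructor
  · rintro ⟨k, hk3, hkk, hkd⟩ hp
    have hk0 : (0:Int) ≤ k := by omega
    have hdvdN : k.toNat ∣ x.toNat := by
      have hc : ((k.toNat : Int)) ∣ ((x.toNat : Int)) := by
        rw [Int.toNat_of_nonneg hk0, Int.toNat_of_nonneg (by omega : (0:Int) ≤ x)]
        exact hkd
      exact_mod_cast hc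
    rcases hp.eq_one_or_self_of_dvd _ hdvdN with h | h
    · omega
    · have hkx : k = x := by omega
      nlinarith
  · intro hnp
    have hn3 : 3 ≤ x.toNat := by omega
    have hpp : (x.toNat.minFac).Prime := Nat.minFac_prime (by omega)
    have hpd : x.toNat.minFac ∣ x.toNat := Nat.minFac_dvd _
    have hsq : x.toNat.minFac ^ 2 ≤ x.toNat := Nat.minFac_sq_le_self (by omega) hnp
    have hp2 : x.toNat.minFac ≠ 2 := by
      intro he
      have h2 : 2 ∣ x.toNat := he ▸ hpd
      omega
    have hp3 : 3 ≤ x.toNat.minFac := by have := hpp.two_le; omega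
    refine ⟨(x.toNat.minFac : Int), by exact_mod_cast hp3, ?_, ?_⟩
    · have hmm : x.toNat.minFac * x.toNat.minFac ≤ x.toNat := by nlinarith
      have hc : ((x.toNat.minFac : Int)) * (x.toNat.minFac : Int) ≤ ((x.toNat : Int)) := by
        exact_mod_cast hmm
      omega
    · have hc : ((x.toNat.minFac : Int)) ∣ ((x.toNat : Int)) := Int.natCast_dvd_natCast.mpr hpd
      have hx : ((x.toNat : Int)) = x := by omega
      rwa [hx] at hc

lemma pv_pyRange_eq (limit : Int) :
    PySem.List.pyRange 3 limit 2
      = ((List.range limit.toNat).filter (fun j => decide (1 < j ∧ j % 2 = 1))).map (fun j => Int.ofNat j) := by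
  have hmem : ∀ x : Int, x ∈ PySem.List.pyRange 3 limit 2 ↔
      x ∈ ((List.range limit.toNat).filter (fun j => decide (1 < j ∧ j % 2 = 1))).map (fun j => Int.ofNat j) := by
    intro x
    rw [PySem.List.mem_pyRange_iff_of_pos (by norm_num)]
    simp only [List.mem_map, List.mem_filter, List.mem_range, decide_eq_true_iff]
    simp only [Int.ofNat_eq_natCast]
    constructor
    · rintro ⟨h1, h2, h3⟩
      refine ⟨x.toNat, ⟨by omega, by omega, by omega⟩, by omega⟩
    · rintro ⟨j, ⟨hj, hq1, hq2⟩, rfl⟩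
      refine ⟨by omega, by omega, by omega⟩
  have hpw1 : List.Pairwise (· < ·) (PySem.List.pyRange 3 limit 2) := by
    rw [PySem.List.pyRange_of_pos _ _ (by norm_num : (0:Int) < 2)]
    rw [List.pairwise_map]
    exact List.pairwise_lt_range.imp (fun h => by omega)
  have hpw2 : List.Pairwise (· < ·)
      (((List.range limit.toNat).filter (fun j => decide (1 < j ∧ j % 2 = 1))).map (fun j => Int.ofNat j)) := by
    rw [List.pairwise_map]
    refine (List.Pairwise.sublist List.filter_sublist List.pairwise_lt_range).imp ?_
    intro a b hab
    simp only [Int.ofNat_eq_natCast]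
    exact_mod_cast hab
  have hnd1 : (PySem.List.pyRange 3 limit 2).Nodup := hpw1.imp ne_of_lt
  have hnd2 : (((List.range limit.toNat).filter (fun j => decide (1 < j ∧ j % 2 = 1))).map (fun j => Int.ofNat j)).Nodup :=
    hpw2.imp ne_of_lt
  have hperm := List.perm_of_nodup_nodup_toFinset_eq hnd1 hnd2 (by
    ext a
    simp only [List.mem_toFinset]
    exact hmem a)
  exact List.Perm.eq_of_pairwise (fun a b _ _ hab hba => absurd hba (lt_asymm hab)) hpw1 hpw2 hperm

lemma pv_foldl_filter (l : List Int) (acc : List Int) :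
    l.foldl (fun out n => if pvHasOddDivisor n then out ++ [n] else out) acc
      = acc ++ l.filter pvHasOddDivisor := by
  induction l generalizing acc with
  | nil => simp
  | cons n l ih =>
    simp only [List.foldl_cons, List.filter_cons]
    by_cases h : pvHasOddDivisor n
    · rw [if_pos h, if_pos h, ih, List.append_assoc]
      rfl
    · rw [if_neg h, if_neg h, ih]

lemma pv_B_eq_canon (limit : Int) :
    gen_odd_composites_alt limit = pvCanon limit.toNat := by
  unfold gen_odd_composites_alt pvCanon
  rw [pv_foldl_filter, List.nil_append, pv_pyRange_eq, List.filter_map, List.filter_filter]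
  congr 1
  apply List.filter_congr
  intro j hj
  simp only [List.mem_range] at hj
  simp only [Function.comp, Int.ofNat_eq_natCast]
  unfold pvPred
  by_cases hq : 1 < j ∧ j % 2 = 1
  · have h3 : (3:Int) ≤ (j:Int) := by omega
    have hodd : (j:Int) % 2 = 1 := by omega
    rw [pv_hasOddDivisor_correct _ h3 hodd]
    simp only [Int.toNat_natCast]
    have hqt : decide (1 < j ∧ j % 2 = 1) = true := decide_eq_true hq
    by_cases hp : j.Prime
    · simp [hqt, hp]
    · simp [hqt, hp]
  · have hqf : decide (1 < j ∧ j % 2 = 1) = false := decide_eq_false hq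
    simp [hqf]
    intro h1 h2
    exact absurd ⟨h1, h2⟩ hq

-- ===== VERDICT (by name: the statement is the Claim_ definition above) =====
theorem gen_odd_composites_spec : Claim_equal_gen_odd_composites := by
  intro limit _ hpre
  unfold Spec_gen_odd_composites
  rw [pv_A_eq_canon limit hpre, pv_B_eq_canon limit]
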